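-- pv_equiv track=rewrite | github.com/CROSS-signature/CROSS-implementation | Additional_Implementations/Parameter_Generation_Scripts/seed_tree_structure_constants.py | compute_nodes_per_level_and_offsets
-- ===== SOURCE A (Python) =====
-- from math import log2, ceil
--
-- def compute_nodes_per_level_and_offsets(T):
--     nodes_per_level = []
--     nodes_curr_level = T
--     total_nodes = 0
--     for level in range(ceil(log2(T)),-1,-1):
--         nodes_per_level = [nodes_curr_level] + nodes_per_level
--         total_nodes += nodes_curr_level
--         nodes_curr_level = ceil(nodes_curr_level/2)
--
--     cumulative_offset = 0
--     total_saved_nodes = 0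
--     level_offsets = []
--     # Level 0, the root has no previous levels, no missing nodes before it
--     missing_nodes_before_level = []
--     cumul_saved_nodes = []
--     for level in range(ceil(log2(T))+1):
--         level_offsets.append(cumulative_offset)
--         cumulative_offset += nodes_per_level[level]
--         if (level == 0):
--             missing_nodes_before_level.append(0)
--         else:
--             missing_nodes_before_level.append(total_saved_nodes)
--         total_saved_nodes += 2**level-nodes_per_level[level]
--
--         cumul_saved_nodes.append(total_saved_nodes)
--
--     return total_nodes,total_nodes-nodes_per_level[-1],nodes_per_level,level_offsets,missing_nodes_before_level
-- ===== SOURCE B (Python) =====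
-- def compute_nodes_per_level_and_offsets(T):
--     # closed form: L = ceil(log2(T)) via bit_length, nodes_per_level[i] = ceil(T / 2**(L-i)),
--     # then one forward pass of prefix sums
--     L = (T - 1).bit_length()
--     nodes_per_level = [-(-T // 2 ** (L - i)) for i in range(L + 1)]
--     total_nodes = sum(nodes_per_level)
--     level_offsets = []
--     missing_nodes_before_level = []
--     cumulative_offset = 0
--     total_saved_nodes = 0
--     for level, n in enumerate(nodes_per_level):
--         level_offsets.append(cumulative_offset)
--         missing_nodes_before_level.append(total_saved_nodes)
--         cumulative_offset += n
--         total_saved_nodes += 2 ** level - n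
--     return (total_nodes, total_nodes - nodes_per_level[-1], nodes_per_level,
--             level_offsets, missing_nodes_before_level)
-- ===== Notes on version B (the rewrite author's own statement) =====
-- stated objective: simpler
-- what changed: Replaces A's bottom-up repeated-halving loop with list prepending plus a second indexed range loop by a closed form nodes_per_level[i]=ceil(T/2**(L-i)) with L=(T-1).bit_length(), pure-integer arithmetic instead of float log2/ceil, and a single forward enumerate pass of prefix sums without the level==0 special case.
-- outside the precondition, e.g. on compute_nodes_per_level_and_offsets(0): A raises ValueError, B returns (0, 0, [0, 0], [0, 0], [0, 1])
import Mathlib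
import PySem

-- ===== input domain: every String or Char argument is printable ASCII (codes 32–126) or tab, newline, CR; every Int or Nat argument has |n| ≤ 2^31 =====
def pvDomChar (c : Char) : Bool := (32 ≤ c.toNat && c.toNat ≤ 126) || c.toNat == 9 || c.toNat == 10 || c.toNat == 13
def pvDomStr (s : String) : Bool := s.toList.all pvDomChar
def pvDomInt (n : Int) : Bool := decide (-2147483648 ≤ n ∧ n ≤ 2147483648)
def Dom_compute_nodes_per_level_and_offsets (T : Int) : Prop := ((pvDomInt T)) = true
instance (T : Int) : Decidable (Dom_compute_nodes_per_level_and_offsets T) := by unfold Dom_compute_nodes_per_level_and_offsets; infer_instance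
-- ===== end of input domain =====

-- B changes A's two loops (bottom-up repeated halving with prepending, then an indexed range loop)
-- into a closed form ceil(T / 2^(L-i)) plus one forward prefix-sum pass; objective: simpler.

-- ===== PORT A =====
-- ceil(log2(T)) of the Python: exact for 1 ≤ T ≤ 2^31 (float log2/ceil are exact there, see Pre_)
def pyCeilLog2 (T : Int) : Int := (Nat.clog 2 T.toNat : Int)
-- ceil(x/2) of the Python (float division then ceil): exact for |x| ≤ 2^31
def pyCeilHalf (x : Int) : Int := -(PySem.Int.floordiv (-x) 2)

def compute_nodes_per_level_and_offsets (T : Int) : Int × Int × List Int × List Int × List Int :=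
  -- first loop: for level in range(ceil(log2(T)), -1, -1)
  let s1 := (PySem.List.pyRange (pyCeilLog2 T) (-1) (-1)).foldl
      (fun (st : List Int × Int × Int) _level =>
        (st.2.1 :: st.1, pyCeilHalf st.2.1, st.2.2 + st.2.1))
      ([], T, 0)
  let nodes_per_level := s1.1
  let total_nodes := s1.2.2
  -- second loop: for level in range(ceil(log2(T)) + 1); nodes_per_level[level] is always in range
  let s2 := (PySem.List.pyRange 0 (pyCeilLog2 T + 1) 1).foldl
      (fun (st : Int × Int × List Int × List Int × List Int) level =>
        let cumulative_offset := st.1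
        let total_saved_nodes := st.2.1
        let n := PySem.List.pyGetD nodes_per_level level 0
        let level_offsets := st.2.2.1 ++ [cumulative_offset]
        let missing := if level == 0 then st.2.2.2.1 ++ [0] else st.2.2.2.1 ++ [total_saved_nodes]
        let total_saved_nodes' := total_saved_nodes + (2 ^ level.toNat - n)
        let cumul_saved_nodes := st.2.2.2.2 ++ [total_saved_nodes']
        (cumulative_offset + n, total_saved_nodes', level_offsets, missing, cumul_saved_nodes))
      (0, 0, [], [], [])
  (total_nodes, total_nodes - PySem.List.pyGetD nodes_per_level (-1) 0,
   nodes_per_level, s2.2.2.1, s2.2.2.2.1)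

-- ===== PORT B =====
def compute_nodes_per_level_and_offsets_alt (T : Int) : Int × Int × List Int × List Int × List Int :=
  let L := PySem.Int.bitLength (T - 1)
  let nodes_per_level := (List.range (L + 1)).map (fun i => -(PySem.Int.floordiv (-T) (2 ^ (L - i))))
  let total_nodes := nodes_per_level.sum
  let s := (PySem.List.enumerate nodes_per_level).foldl
      (fun (st : Int × Int × List Int × List Int) (p : Int × Int) =>
        (st.1 + p.2, st.2.1 + (2 ^ p.1.toNat - p.2),
         st.2.2.1 ++ [st.1], st.2.2.2 ++ [st.2.1]))
      (0, 0, [], [])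
  (total_nodes, total_nodes - PySem.List.pyGetD nodes_per_level (-1) 0,
   nodes_per_level, s.2.2.1, s.2.2.2)

-- ===== PRECONDITION & SPEC =====
-- Python A raises ValueError (log2 domain error) for T ≤ 0; nothing else is excluded.
def Pre_compute_nodes_per_level_and_offsets (T : Int) : Prop := 1 ≤ T
instance (T : Int) : Decidable (Pre_compute_nodes_per_level_and_offsets T) := by unfold Pre_compute_nodes_per_level_and_offsets; infer_instance
def pvWitness_compute_nodes_per_level_and_offsets : Int := 6

def Spec_compute_nodes_per_level_and_offsets (T : Int) (out : Int × Int × List Int × List Int × List Int) : Prop := out = compute_nodes_per_level_and_offsets_alt T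
instance (T : Int) (out : Int × Int × List Int × List Int × List Int) : Decidable (Spec_compute_nodes_per_level_and_offsets T out) := by unfold Spec_compute_nodes_per_level_and_offsets; infer_instance

-- ===== CLAIM (what is proved, stated in full; the proofs are below) =====
def Claim_equal_compute_nodes_per_level_and_offsets : Prop := ∀ (T : Int), Dom_compute_nodes_per_level_and_offsets T → Pre_compute_nodes_per_level_and_offsets T → Spec_compute_nodes_per_level_and_offsets T (compute_nodes_per_level_and_offsets T)

-- ===== LEMMAS AND PROOFS =====

-- ceil division by a positive divisor, as both Pythons write it: -((-a) // b)
def cdiv (a b : Int) : Int := -(PySem.Int.floordiv (-a) b)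

lemma pyCeilHalf_eq (x : Int) : pyCeilHalf x = cdiv x 2 := rfl

lemma cdiv_one (a : Int) : cdiv a 1 = a := by
  simp [cdiv, PySem.Int.floordiv]

lemma cdiv_cdiv (a m : Int) (hm : 0 < m) : cdiv (cdiv a m) 2 = cdiv a (m * 2) := by
  unfold cdiv
  rw [neg_neg, PySem.Int.floordiv_eq_ediv_of_pos hm, PySem.Int.floordiv_eq_ediv_of_pos (by norm_num),
      PySem.Int.floordiv_eq_ediv_of_pos (by positivity)]
  rw [Int.ediv_ediv_of_nonneg hm.le]

-- L agreement: ceil(log2 T) = (T-1).bit_length() for 1 ≤ T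
lemma clog_eq_bitLength (T : Int) (hT : 1 ≤ T) :
    Nat.clog 2 T.toNat = PySem.Int.bitLength (T - 1) := by
  set B := PySem.Int.bitLength (T - 1) with hB
  have h1 : (T - 1).natAbs < 2 ^ B := PySem.Int.lt_two_pow_bitLength (T - 1)
  apply le_antisymm
  · rw [Nat.clog_le_iff_le_pow (by norm_num)]
    omega
  · rcases eq_or_lt_of_le hT with h | h
    · have : T - 1 = 0 := by omega
      simp [hB, this]
    · have hne : T - 1 ≠ 0 := by omega
      have h2 : 2 ^ (B - 1) ≤ (T - 1).natAbs := PySem.Int.two_pow_bitLength_le _ hne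
      have h3 : T.toNat ≤ 2 ^ Nat.clog 2 T.toNat := Nat.le_pow_clog (by norm_num) _
      have hB1 : 1 ≤ B := by
        by_contra hc
        interval_cases B
        omega
      have h4 : 2 ^ (B - 1) < 2 ^ Nat.clog 2 T.toNat := by omega
      have := (Nat.pow_lt_pow_iff_right (by norm_num : 1 < 2)).mp h4
      omega

-- a fold whose body ignores the list elements is an iterate
lemma foldl_ignore_iterate {α β : Type} (g : β → β) (l : List α) (init : β) :
    l.foldl (fun s _ => g s) init = g^[l.length] init := by
  induction l generalizing init with
  | nil => rfl
  | cons x t ih => simpa using ih (g init)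

-- characterisation of A's first loop after n+1 iterations
lemma loop1_iterate (T : Int) (n : Nat) :
    (fun (st : List Int × Int × Int) =>
      (st.2.1 :: st.1, pyCeilHalf st.2.1, st.2.2 + st.2.1))^[n+1] ([], T, 0) =
    ((List.range (n+1)).map (fun i => cdiv T (2 ^ (n - i))),
     cdiv T (2 ^ (n+1)),
     ((List.range (n+1)).map (fun i => cdiv T (2 ^ (n - i)))).sum) := by
  induction n with
  | zero =>
    simp [pyCeilHalf_eq, cdiv_one]
  | succ n ih =>
    rw [Function.iterate_succ_apply', ih]
    simp only [pyCeilHalf_eq]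
    have hmap : (List.range (n+2)).map (fun i => cdiv T (2 ^ (n + 1 - i))) =
        cdiv T (2 ^ (n+1)) :: (List.range (n+1)).map (fun i => cdiv T (2 ^ (n - i))) := by
      rw [List.range_succ_eq_map]
      simp [Function.comp_def]
    rw [hmap]
    refine Prod.ext ?_ (Prod.ext ?_ ?_)
    · rfl
    · show cdiv (cdiv T (2 ^ (n+1))) 2 = cdiv T (2 ^ (n+2))
      rw [cdiv_cdiv _ _ (by positivity), ← pow_succ]
    · show _ + cdiv T (2 ^ (n+1)) = _
      simp [add_comm]

-- the two second loops agree component-wise (A's indexed range loop vs B's enumerate pass)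
lemma loop2_eq (ns : List Int) (k : Nat) (hk : k ≤ ns.length) :
    (let a := (PySem.List.pyRange 0 (k : Int) 1).foldl
        (fun (st : Int × Int × List Int × List Int × List Int) level =>
          let cumulative_offset := st.1
          let total_saved_nodes := st.2.1
          let n := PySem.List.pyGetD ns level 0
          let level_offsets := st.2.2.1 ++ [cumulative_offset]
          let missing := if level == 0 then st.2.2.2.1 ++ [0] else st.2.2.2.1 ++ [total_saved_nodes]
          let total_saved_nodes' := total_saved_nodes + (2 ^ level.toNat - n)
          let cumul_saved_nodes := st.2.2.2.2 ++ [total_saved_nodes']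
          (cumulative_offset + n, total_saved_nodes', level_offsets, missing, cumul_saved_nodes))
        (0, 0, [], [], [])
     let b := (PySem.List.enumerate (ns.take k)).foldl
        (fun (st : Int × Int × List Int × List Int) (p : Int × Int) =>
          (st.1 + p.2, st.2.1 + (2 ^ p.1.toNat - p.2),
           st.2.2.1 ++ [st.1], st.2.2.2 ++ [st.2.1]))
        (0, 0, [], [])
     a.1 = b.1 ∧ a.2.1 = b.2.1 ∧ a.2.2.1 = b.2.2.1 ∧ a.2.2.2.1 = b.2.2.2) := by
  induction k with
  | zero =>
    simp [PySem.List.pyRange_one_eq_nil]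
  | succ k ih =>
    have hk' : k ≤ ns.length := Nat.le_of_succ_le hk
    have hlt : k < ns.length := hk
    obtain ⟨h1, h2, h3, h4⟩ := ih hk'
    have hrange : PySem.List.pyRange 0 ((k+1 : Nat) : Int) 1
        = PySem.List.pyRange 0 (k : Int) 1 ++ [(k : Int)] := by
      push_cast
      exact PySem.List.pyRange_one_succ_right (by positivity)
    have htake : ns.take (k+1) = ns.take k ++ [ns[k]] := by
      rw [List.take_add_one]
      simp [List.getElem?_eq_getElem hlt]
    have hlen : (ns.take k).length = k := List.length_take_of_le hk'
    have hget : PySem.List.pyGetD ns ((k : Nat) : Int) 0 = ns[k] :=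
      PySem.List.pyGetD_ofNat ns k 0 hlt
    rw [hrange, List.foldl_append, htake, PySem.List.enumerate_append, List.foldl_append]
    simp only [hlen, PySem.List.enumerate_cons, PySem.List.enumerate_nil, List.foldl_cons,
      List.foldl_nil, zero_add, hget]
    cases Nat.eq_zero_or_pos k with
    | inl h0 =>
      subst h0
      simp only [PySem.List.enumerate_nil] at h1 h2 h3 h4 ⊢
      simp_all
    | inr hpos =>
      have hne : (((k : Nat) : Int) == 0) = false := by
        simp
        omega
      simp only [hne, if_false, h1, h2, h3, h4]
      simp

-- ===== VERDICT (by name: the statement is the Claim_ definition above) =====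
theorem compute_nodes_per_level_and_offsets_spec : Claim_equal_compute_nodes_per_level_and_offsets := by
  intro T _ hpre
  unfold Spec_compute_nodes_per_level_and_offsets
  have hL : pyCeilLog2 T = ((PySem.Int.bitLength (T - 1) : Nat) : Int) := by
    unfold pyCeilLog2
    rw [clog_eq_bitLength T hpre]
  set L : Nat := PySem.Int.bitLength (T - 1) with hLdef
  unfold compute_nodes_per_level_and_offsets compute_nodes_per_level_and_offsets_alt
  simp only [hL]
  -- first loop: a fold that ignores its elements, characterised by loop1_iterate
  have hlen1 : (PySem.List.pyRange ((L : Int)) (-1) (-1)).length = L + 1 := by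
    rw [PySem.List.length_pyRange_neg_one]
    omega
  have hfold1 : (PySem.List.pyRange ((L : Int)) (-1) (-1)).foldl
      (fun (st : List Int × Int × Int) _level =>
        (st.2.1 :: st.1, pyCeilHalf st.2.1, st.2.2 + st.2.1)) ([], T, 0) =
      ((List.range (L+1)).map (fun i => cdiv T (2 ^ (L - i))),
       cdiv T (2 ^ (L+1)),
       ((List.range (L+1)).map (fun i => cdiv T (2 ^ (L - i)))).sum) := by
    rw [foldl_ignore_iterate (fun (st : List Int × Int × Int) =>
        (st.2.1 :: st.1, pyCeilHalf st.2.1, st.2.2 + st.2.1)), hlen1, loop1_iterate]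
  rw [hfold1]
  dsimp only
  set ns := (List.range (L+1)).map (fun i => cdiv T (2 ^ (L - i))) with hns
  have hlen : L + 1 ≤ ns.length := by simp [hns]
  obtain ⟨e1, e2, e3, e4⟩ := loop2_eq ns (L+1) hlen
  rw [List.take_of_length_le (by simp [hns])] at e3 e4
  push_cast at e3 e4
  rw [← hLdef]
  have hsame : ns = List.map (fun i => -PySem.Int.floordiv (-T) (2 ^ (L - i))) (List.range (L+1)) := rfl
  rw [← hsame]
  simp only [Prod.mk.injEq]
  exact ⟨trivial, trivial, trivial, e3, e4⟩
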